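-- pv_equiv track=rewrite | github.com/nvrtmd/algorithm-solving | Programmers/Programmers 096.py | solution
-- ===== SOURCE A (Python) =====
-- def solution(k, tangerine):
--     answer = 0
--
--     dict = {}
--     for i in tangerine:
--         try:
--             dict[i] += 1
--         except:
--             dict[i] = 1
--
--     sorted_dict_list = sorted(
--         dict.items(), key=lambda item: item[1])
--
--     while k > 0:
--         popped_tangerine = sorted_dict_list.pop()
--         k -= popped_tangerine[1]
--         answer += 1
--     return answer
-- ===== SOURCE B (Python) =====
-- def solution(k, tangerine):
--     counts = {}
--     for t in tangerine:
--         counts[t] = counts.get(t, 0) + 1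
--     if k <= 0:
--         return 0
--     running = 0
--     prefix = []
--     for c in sorted(counts.values(), reverse=True):
--         running += c
--         prefix.append(running)
--     return sum(1 for s in prefix if s < k) + 1
-- ===== Notes on version B (the rewrite author's own statement) =====
-- stated objective: alternative
-- what changed: Replaces A's destructive pop-and-subtract greedy loop over the ascending-sorted items list with a non-mutating formulation: prefix sums of the descending count sequence, with the answer read off as (number of prefix sums below k) + 1, and 0 for k <= 0.
import Mathlib
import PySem

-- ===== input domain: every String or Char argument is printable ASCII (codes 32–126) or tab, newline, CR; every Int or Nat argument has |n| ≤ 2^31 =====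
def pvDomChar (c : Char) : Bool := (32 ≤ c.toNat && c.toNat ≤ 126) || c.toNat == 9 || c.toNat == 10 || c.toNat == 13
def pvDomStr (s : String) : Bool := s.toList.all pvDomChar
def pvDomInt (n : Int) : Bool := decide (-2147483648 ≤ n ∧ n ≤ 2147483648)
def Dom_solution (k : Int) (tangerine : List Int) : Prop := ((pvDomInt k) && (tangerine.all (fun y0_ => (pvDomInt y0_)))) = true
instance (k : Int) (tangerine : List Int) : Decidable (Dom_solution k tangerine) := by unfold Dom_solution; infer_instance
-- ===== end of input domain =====

-- B replaces A's destructive pop-and-subtract greedy loop by prefix sums of the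
-- descending counts plus a count of prefix sums below k (objective: alternative).


-- ===== PORT A =====
-- the 'while k > 0: popped = sorted_dict_list.pop(); k -= popped[1]; answer += 1' loop;
-- pop() on the empty list raises IndexError in Python — excluded by Pre_solution
def solutionLoop (k : Int) (lst : List (Int × Int)) (answer : Int) : Int :=
  if k > 0 then
    match _h : lst.getLast? with
    | none => answer   -- IndexError: excluded by Pre_solution
    | some popped => solutionLoop (k - popped.2) lst.dropLast (answer + 1)
  else answer
termination_by lst.length
decreasing_by
  cases lst with
  | nil => simp at _h
  | cons a l => simp [List.length_dropLast]

def solution (k : Int) (tangerine : List Int) : Int :=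
  let d := tangerine.foldl (fun d i => d.insert i (d.getD i 0 + 1)) PySem.Dict.empty
  let sorted_dict_list := PySem.List.sorted d.items (fun item => item.2) false
  solutionLoop k sorted_dict_list 0

-- ===== PORT B =====
def solution_alt (k : Int) (tangerine : List Int) : Int :=
  let counts := tangerine.foldl (fun d t => d.insert t (d.getD t 0 + 1)) PySem.Dict.empty
  if k ≤ 0 then 0
  else
    let st := (PySem.List.sorted counts.values (fun c => c) true).foldl
      (fun (st : Int × List Int) c => (st.1 + c, st.2 ++ [st.1 + c])) (0, [])
    ((st.2.countP (fun s => decide (s < k)) : Int)) + 1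

-- ===== PRECONDITION & SPEC =====
-- A raises IndexError (pop from an empty list) exactly when k exceeds the total
-- number of tangerines; those inputs are excluded.
def Pre_solution (k : Int) (tangerine : List Int) : Prop := k ≤ tangerine.length
instance (k : Int) (tangerine : List Int) : Decidable (Pre_solution k tangerine) := by unfold Pre_solution; infer_instance
def pvWitness_solution : Int × List Int := (2, [1, 1, 2])

def Spec_solution (k : Int) (tangerine : List Int) (out : Int) : Prop := out = solution_alt k tangerine
instance (k : Int) (tangerine : List Int) (out : Int) : Decidable (Spec_solution k tangerine out) := by unfold Spec_solution; infer_instance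

-- ===== CLAIM (what is proved, stated in full; the proofs are below) =====
def Claim_equal_solution : Prop := ∀ (k : Int) (tangerine : List Int), Dom_solution k tangerine → Pre_solution k tangerine → Spec_solution k tangerine (solution k tangerine)

-- ===== LEMMAS AND PROOFS =====

-- abstract greedy consumption (A's loop read front-to-back on the reversed list)
def pvGreedy (k : Int) : List Int → Int
  | [] => 0
  | c :: r => if k > 0 then 1 + pvGreedy (k - c) r else 0

-- prefix sums starting from acc (B's fold)
def pvPfx (acc : Int) : List Int → List Int
  | [] => []
  | c :: r => (acc + c) :: pvPfx (acc + c) r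

theorem pvGreedy_nonpos (cs : List Int) (k : Int) (hk : ¬ k > 0) : pvGreedy k cs = 0 := by
  cases cs <;> simp [pvGreedy, hk]

theorem solutionLoop_eq (lst : List (Int × Int)) : ∀ (k a : Int),
    solutionLoop k lst a = a + pvGreedy k (lst.reverse.map (·.2)) := by
  induction lst using List.reverseRecOn with
  | nil =>
    intro k a
    rw [solutionLoop]
    by_cases hk : k > 0 <;> simp [hk, pvGreedy]
  | append_singleton ys p ih =>
    intro k a
    rw [solutionLoop]
    by_cases hk : k > 0
    · simp only [hk, if_pos]
      split
      · next h => simp at h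
      · next popped h =>
        have hp : popped = p := by
          rw [List.getLast?_concat] at h
          exact ((Option.some.injEq _ _).mp h).symm
        subst hp
        rw [List.dropLast_concat, ih]
        simp [pvGreedy, hk]
        ring
    · simp [hk, pvGreedy_nonpos _ _ hk]

theorem pvPfx_shift (cs : List Int) : ∀ acc : Int, pvPfx acc cs = (pvPfx 0 cs).map (fun s => acc + s) := by
  induction cs with
  | nil => intro acc; simp [pvPfx]
  | cons c r ih =>
    intro acc
    simp only [pvPfx]
    rw [ih (acc + c), ih (0 + c)]
    simp [add_assoc]

theorem pvPfx_mem_pos (cs : List Int) : ∀ (acc s : Int), (∀ c ∈ cs, 0 < c) → s ∈ pvPfx acc cs → acc < s := by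
  induction cs with
  | nil => intro acc s _ hs; simp [pvPfx] at hs
  | cons c r ih =>
    intro acc s hpos hs
    simp only [pvPfx, List.mem_cons] at hs
    rcases hs with rfl | hs
    · have := hpos c (by simp); omega
    · have := ih (acc + c) s (fun x hx => hpos x (by simp [hx])) hs
      have := hpos c (by simp); omega

theorem pvFold_snd (cs : List Int) : ∀ (acc : Int) (l : List Int),
    (cs.foldl (fun (st : Int × List Int) c => (st.1 + c, st.2 ++ [st.1 + c])) (acc, l)).2
      = l ++ pvPfx acc cs := by
  induction cs with
  | nil => intro acc l; simp [pvPfx]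
  | cons c r ih =>
    intro acc l
    simp only [List.foldl_cons, pvPfx]
    rw [ih]
    simp

-- the core identity: greedy group count = number of prefix sums < k, plus one
theorem pvGreedy_eq_count (cs : List Int) : ∀ k : Int, (∀ c ∈ cs, 0 < c) → 0 < k → k ≤ cs.sum →
    pvGreedy k cs = ((pvPfx 0 cs).countP (fun s => decide (s < k)) : Int) + 1 := by
  induction cs with
  | nil => intro k _ hk hsum; simp at hsum; omega
  | cons c r ih =>
    intro k hpos hk hsum
    have hc : 0 < c := hpos c (by simp)
    have hr : ∀ x ∈ r, 0 < x := fun x hx => hpos x (by simp [hx])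
    simp only [pvGreedy, if_pos hk, pvPfx, List.countP_cons]
    rw [pvPfx_shift r (0 + c)]
    simp only [zero_add]
    by_cases hck : c < k
    · have h1 : k - c ≤ r.sum := by rw [List.sum_cons] at hsum; omega
      rw [ih (k - c) hr (by omega) h1]
      rw [List.countP_map]
      have hcg : ((pvPfx 0 r).countP ((fun s => decide (s < k)) ∘ fun s => c + s))
          = ((pvPfx 0 r).countP (fun s => decide (s < k - c))) := by
        apply List.countP_congr
        intro a _
        simp only [Function.comp_apply, decide_eq_true_eq]
        omega
      rw [hcg, decide_eq_true hck]
      have hone : (if (true : Bool) = true then (1 : Nat) else 0) = 1 := rfl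
      rw [hone]
      push_cast
      omega
    · have h0 : pvGreedy (k - c) r = 0 := pvGreedy_nonpos r (k - c) (by omega)
      rw [h0]
      have hz : ((pvPfx 0 r).map (fun s => c + s)).countP (fun s => decide (s < k)) = 0 := by
        rw [List.countP_eq_zero]
        intro s hs
        simp only [List.mem_map] at hs
        obtain ⟨t, ht, rfl⟩ := hs
        have := pvPfx_mem_pos r 0 t hr ht
        simp only [decide_eq_true_eq]
        omega
      rw [hz, decide_eq_false hck]
      have hzero : (if (false : Bool) = true then (1 : Nat) else 0) = 0 := rfl
      rw [hzero]
      simp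

-- both descending count sequences coincide
theorem pvDesc_eq (d : PySem.Dict Int Int) :
    ((PySem.List.sorted d.items (fun item => item.2) false).reverse.map (·.2))
      = PySem.List.sorted d.values (fun c => c) true := by
  have hperm : ((PySem.List.sorted d.items (fun item => item.2) false).reverse.map (·.2)).Perm
      (PySem.List.sorted d.values (fun c => c) true) := by
    have h1 : (PySem.List.sorted d.items (fun item => item.2) false).Perm d.items :=
      PySem.List.sorted_perm _ _ _
    have h2 : ((PySem.List.sorted d.items (fun item => item.2) false).reverse.map (·.2)).Perm
        (d.items.map (·.2)) := (List.reverse_perm _ |>.trans h1).map _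
    have h3 : (PySem.List.sorted d.values (fun c => c) true).Perm d.values :=
      PySem.List.sorted_perm _ _ _
    exact h2.trans h3.symm
  have hp1 : ((PySem.List.sorted d.items (fun item => item.2) false).reverse.map (·.2)).Pairwise
      (fun a b : Int => b ≤ a) := by
    have h := PySem.List.sorted_pairwise (xs := d.items) (key := fun item => item.2)
    have hrev : ((PySem.List.sorted d.items (fun item => item.2) false).reverse).Pairwise
        (fun a b : Int × Int => b.2 ≤ a.2) := by
      rw [List.pairwise_reverse]; exact h
    exact hrev.map _ (fun a b h => h)
  have hp2 : (PySem.List.sorted d.values (fun c => c) true).Pairwise (fun a b : Int => b ≤ a) :=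
    (PySem.List.sorted_pairwise_rev (xs := d.values) (key := fun c : Int => c)).imp (fun h => h)
  exact List.Perm.eq_of_pairwise (fun a b _ _ h1 h2 => le_antisymm h2 h1) hp1 hp2 hperm

-- sum and positivity of the counter's values
theorem pvCounter_values (tangerine : List Int) :
    (PySem.Dict.counter tangerine : PySem.Dict Int Int).values
      = (PySem.Set.ofList tangerine).map (fun v => (tangerine.count v : Int)) := by
  have h := PySem.Dict.items_counter (xs := tangerine)
  have : (PySem.Dict.counter tangerine : PySem.Dict Int Int).values
      = (PySem.Dict.counter tangerine : PySem.Dict Int Int).items.map (·.2) := rfl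
  rw [this, h, List.map_map]
  rfl

theorem pvValues_pos (tangerine : List Int) (c : Int)
    (hc : c ∈ (PySem.Dict.counter tangerine : PySem.Dict Int Int).values) : 0 < c := by
  rw [pvCounter_values] at hc
  simp only [List.mem_map] at hc
  obtain ⟨v, hv, rfl⟩ := hc
  have : v ∈ tangerine := (PySem.Set.mem_ofList _ _).mp hv
  have : 0 < tangerine.count v := List.count_pos_iff.mpr this
  exact_mod_cast this

theorem pvValues_sum (tangerine : List Int) :
    ((PySem.Dict.counter tangerine : PySem.Dict Int Int).values).sum = (tangerine.length : Int) := by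
  rw [pvCounter_values]
  have hperm : (PySem.Set.ofList tangerine).Perm tangerine.dedup := by
    apply (List.perm_ext_iff_of_nodup (PySem.Set.nodup_ofList _) (List.nodup_dedup _)).mpr
    intro a
    rw [PySem.Set.mem_ofList, List.mem_dedup]
  have := (hperm.map (fun v => (tangerine.count v : Int))).sum_eq
  rw [this]
  have hcast : ∀ l : List Int, (l.map fun v => (tangerine.count v : Int)).sum
      = ((l.map fun v => tangerine.count v).sum : Int) := by
    intro l
    induction l with
    | nil => simp
    | cons a l ih => simp [ih]
  rw [hcast, List.sum_map_count_dedup_eq_length]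

-- ===== VERDICT (by name: the statement is the Claim_ definition above) =====
theorem solution_spec : Claim_equal_solution := by
  intro k tangerine _hdom hpre
  unfold Spec_solution solution solution_alt
  have hcnt : tangerine.foldl (fun d i => d.insert i (d.getD i 0 + 1)) PySem.Dict.empty
      = PySem.Dict.counter tangerine := PySem.Dict.foldl_insert_getD_add_one_eq_counter tangerine
  simp only [hcnt]
  rw [solutionLoop_eq, pvDesc_eq]
  by_cases hk : k ≤ 0
  · rw [pvGreedy_nonpos _ _ (by omega)]
    simp [hk]
  · rw [if_neg hk]
    rw [pvFold_snd]
    simp only [List.nil_append]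
    have hsorted_perm : (PySem.List.sorted (PySem.Dict.counter tangerine : PySem.Dict Int Int).values (fun c => c) true).Perm
        (PySem.Dict.counter tangerine : PySem.Dict Int Int).values := PySem.List.sorted_perm _ _ _
    rw [zero_add, pvGreedy_eq_count]
    · intro c hc
      exact pvValues_pos tangerine c (hsorted_perm.mem_iff.mp hc)
    · omega
    · rw [hsorted_perm.sum_eq, pvValues_sum]
      exact le_trans hpre (by exact_mod_cast le_refl _)
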